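-- pv_equiv track=rewrite | github.com/AlgoBuddies/SpaceDust-Storage | LV0/개미 군단/problem7.py | solution
-- ===== SOURCE A (Python) =====
-- def solution(hp):
--     answer = 0
--     while hp != 0:
--         if hp >= 5:
--             answer = answer + hp // 5
--             hp = hp - (hp // 5) * 5
--         elif hp >= 3:
--             answer = answer + hp // 3
--             hp = hp - (hp // 3) * 3
--         elif hp >= 1:
--             answer = answer + hp // 1
--             hp = hp - (hp // 1) * 1
--
--     return answer
-- ===== SOURCE B (Python) =====
-- def solution(hp):
--     rem = hp % 5
--     return hp // 5 + rem // 3 + rem % 3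
-- ===== Notes on version B (the rewrite author's own statement) =====
-- stated objective: simpler
-- what changed: Replaced the greedy while-loop with the arithmetic closed form hp//5 + (hp%5)//3 + (hp%5)%3.
import Mathlib
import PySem

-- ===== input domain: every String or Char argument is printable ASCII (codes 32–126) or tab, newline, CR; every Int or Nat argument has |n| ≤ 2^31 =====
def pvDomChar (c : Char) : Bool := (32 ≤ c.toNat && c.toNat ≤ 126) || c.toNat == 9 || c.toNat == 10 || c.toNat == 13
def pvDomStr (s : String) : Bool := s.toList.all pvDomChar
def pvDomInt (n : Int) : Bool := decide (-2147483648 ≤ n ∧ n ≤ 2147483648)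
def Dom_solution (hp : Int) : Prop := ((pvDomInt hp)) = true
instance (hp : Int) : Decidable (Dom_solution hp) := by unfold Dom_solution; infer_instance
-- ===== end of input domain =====

-- B replaces A's greedy while-loop by the arithmetic closed form hp//5 + (hp%5)//3 + (hp%5)%3 (simpler).

-- ===== PORT A =====
-- Literal port of A's while-loop as structural recursion on the state (hp, answer).
-- When hp < 0 and hp ≠ 0 the Python loop body does nothing and the loop never terminates;
-- such inputs are excluded by Pre_solution, and the port returns the accumulator there only
-- to be total (never reached under Pre_).
def solutionLoop (hp answer : Int) : Int :=
  if hp ≠ 0 then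
    if hp ≥ 5 then
      solutionLoop (hp - (PySem.Int.floordiv hp 5) * 5) (answer + PySem.Int.floordiv hp 5)
    else if hp ≥ 3 then
      solutionLoop (hp - (PySem.Int.floordiv hp 3) * 3) (answer + PySem.Int.floordiv hp 3)
    else if hp ≥ 1 then
      solutionLoop (hp - (PySem.Int.floordiv hp 1) * 1) (answer + PySem.Int.floordiv hp 1)
    else answer  -- Python diverges here (hp < 0); outside Pre_solution
  else answer
termination_by hp.toNat
decreasing_by
  · have h5 : PySem.Int.floordiv hp 5 = hp / 5 := PySem.Int.floordiv_eq_ediv_of_pos (by omega)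
    rw [h5]; omega
  · have h3 : PySem.Int.floordiv hp 3 = hp / 3 := PySem.Int.floordiv_eq_ediv_of_pos (by omega)
    rw [h3]; omega
  · have h1 : PySem.Int.floordiv hp 1 = hp / 1 := PySem.Int.floordiv_eq_ediv_of_pos (by omega)
    rw [h1]; omega

def solution (hp : Int) : Int := solutionLoop hp 0

-- ===== PORT B =====
def solution_alt (hp : Int) : Int :=
  PySem.Int.floordiv hp 5 + PySem.Int.floordiv (PySem.Int.mod hp 5) 3
    + PySem.Int.mod (PySem.Int.mod hp 5) 3

-- ===== PRECONDITION & SPEC =====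
-- Pre_ excludes negative hp, on which A's while-loop never terminates (no branch fires).
def Pre_solution (hp : Int) : Prop := 0 ≤ hp
instance (hp : Int) : Decidable (Pre_solution hp) := by unfold Pre_solution; infer_instance
def pvWitness_solution : Int := (13)
def Spec_solution (hp : Int) (out : Int) : Prop := out = solution_alt hp
instance (hp : Int) (out : Int) : Decidable (Spec_solution hp out) := by unfold Spec_solution; infer_instance

-- ===== CLAIM (what is proved, stated in full; the proofs are below) =====
def Claim_equal_solution : Prop := ∀ (hp : Int), Dom_solution hp → Pre_solution hp → Spec_solution hp (solution hp)

-- ===== LEMMAS AND PROOFS =====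

theorem solution_alt_eq (hp : Int) (h : 0 ≤ hp) :
    solution_alt hp = hp / 5 + (hp % 5) / 3 + (hp % 5) % 3 := by
  unfold solution_alt
  rw [PySem.Int.floordiv_eq_ediv_of_pos (by omega : (0:Int) < 5),
      PySem.Int.mod_eq_emod_of_pos (by omega : (0:Int) < 5),
      PySem.Int.floordiv_eq_ediv_of_pos (by omega : (0:Int) < 3),
      PySem.Int.mod_eq_emod_of_pos (by omega : (0:Int) < 3)]

theorem solutionLoop_eq (hp : Int) (h : 0 ≤ hp) (a : Int) :
    solutionLoop hp a = a + solution_alt hp := by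
  rw [solution_alt_eq hp h]
  induction hn : hp.toNat using Nat.strong_induction_on generalizing hp a with
  | _ n ih =>
    rw [solutionLoop]
    have f5 : PySem.Int.floordiv hp 5 = hp / 5 := PySem.Int.floordiv_eq_ediv_of_pos (by omega)
    have f3 : PySem.Int.floordiv hp 3 = hp / 3 := PySem.Int.floordiv_eq_ediv_of_pos (by omega)
    have f1 : PySem.Int.floordiv hp 1 = hp / 1 := PySem.Int.floordiv_eq_ediv_of_pos (by omega)
    by_cases h0 : hp = 0
    · simp [h0]
    · rw [if_pos h0]
      by_cases h5 : hp ≥ 5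
      · rw [if_pos h5, f5]
        have hr : hp - hp / 5 * 5 = hp % 5 := by omega
        rw [hr, ih (hp % 5).toNat (by omega) (hp % 5) (by omega) _ rfl]
        omega
      · rw [if_neg h5]
        by_cases h3 : hp ≥ 3
        · rw [if_pos h3, f3]
          have hr : hp - hp / 3 * 3 = hp % 3 := by omega
          rw [hr, ih (hp % 3).toNat (by omega) (hp % 3) (by omega) _ rfl]
          omega
        · rw [if_neg h3, if_pos (by omega : hp ≥ 1), f1]
          rw [(by omega : hp - hp / 1 * 1 = 0), ih 0 (by omega) 0 (by omega) _ rfl]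
          omega

-- ===== VERDICT (by name: the statement is the Claim_ definition above) =====
theorem solution_spec : Claim_equal_solution := by
  intro hp _ hpre
  show solution hp = solution_alt hp
  unfold solution
  rw [solutionLoop_eq hp hpre 0, zero_add]
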